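-- pv_equiv track=rewrite | github.com/maiconsc/pynqueens | nqueens.py | diagonal_constraints
-- ===== SOURCE A (Python) =====
-- def diagonal_constraints(n):
--
--     '''
--     Create diagonal constraints (no more than one queen per diagonal)
--     :param n: board size (nxn) and number of queens.
--     :return: clauses in CNF format for SAT solving.
--     '''
--
--     # internal method
--
--     def compute_diagonal(i, n, type):
--
--         di = list(list())
--         possible_x = list()
--         possible_y = list()
--
--         for j in range(0, n):
--             possible_x.append(j)
--             possible_y.append(j)
--
--         if type == 'anti':
--             for j in range(0, len(possible_x)):
--                 for k in range(0, len(possible_y)):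
--                     if (possible_x[j] + possible_y[k]) == i:
--                         di.append([possible_x[j]+1, possible_y[k]+1])
--
--         elif type == 'main':
--             for j in range(0, len(possible_x)):
--                 for k in range(0, len(possible_y)):
--                     if (possible_x[j] - possible_y[k]) == i:
--                         di.append([possible_x[j]+1, possible_y[k]+1])
--
--         return di
--
--     # code
--
--     clauses = list(list())
--
--     for i in range(1, 2*n-2):
--         d = compute_diagonal(i, n, 'anti')
--         for j in range(1, len(d) + 1):
--             for k in range(j+1, len(d)+1):
--                 aux = [-transform_coordinates_xy_to_val(d[j-1], n), -transform_coordinates_xy_to_val(d[k-1], n)]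
--                 clauses.append(aux.copy())
--         aux = list()
--
--     for i in range(-n+2, n-1):
--         d = compute_diagonal(i, n, 'main')
--         for j in range(1, len(d) + 1):
--             for k in range(j+1, len(d)+1):
--                 aux = [-transform_coordinates_xy_to_val(d[j-1], n), -transform_coordinates_xy_to_val(d[k-1], n)]
--                 clauses.append(aux.copy())
--         aux = list()
--
--     return clauses
--
-- def transform_coordinates_xy_to_val(coord_xy, n):
--
--     '''
--     Transform the location in (x, y) coordinates to val coordinate.
--     :param coord_xy: coordinate (x, y). origin is (0, 0).
--     :param n: board size (nxn) and number of queens.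
--     :return: val coordinate (1 <= val <= n^2).
--     '''
--
--     return (coord_xy[1] - 1)*n + coord_xy[0]
-- ===== SOURCE B (Python) =====
-- def diagonal_constraints(n):
--     '''
--     Create diagonal constraints (no more than one queen per diagonal)
--     :param n: board size (nxn) and number of queens.
--     :return: clauses in CNF format for SAT solving.
--     '''
--
--     # emit one at-most-one pair clause per ordered pair of cells (head vs rest)
--     def pairs(cells):
--         out = []
--         while cells:
--             c, cells = cells[0], cells[1:]
--             out += [[-c, -d] for d in cells]
--         return out
--
--     clauses = []
--     # anti-diagonals x + y = i, cells in x-ascending order, val(x, y) = y*n + x + 1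
--     for i in range(1, 2*n - 2):
--         lo, hi = max(0, i - n + 1), min(i, n - 1)
--         clauses += pairs([(i - x)*n + x + 1 for x in range(lo, hi + 1)])
--     # main diagonals x - y = i
--     for i in range(-n + 2, n - 1):
--         lo, hi = max(0, i), min(n - 1, n - 1 + i)
--         clauses += pairs([(x - i)*n + x + 1 for x in range(lo, hi + 1)])
--     return clauses
-- ===== Notes on version B (the rewrite author's own statement) =====
-- stated objective: alternative
-- what changed: B computes each diagonal's cell values in closed form (an arithmetic x-range per diagonal, with the value derived directly) instead of re-scanning the whole board for every diagonal and storing coordinate pairs for a later transform, and emits the pair clauses by a head-versus-rest pass over the cell list instead of A's double index loop.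
import Mathlib
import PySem

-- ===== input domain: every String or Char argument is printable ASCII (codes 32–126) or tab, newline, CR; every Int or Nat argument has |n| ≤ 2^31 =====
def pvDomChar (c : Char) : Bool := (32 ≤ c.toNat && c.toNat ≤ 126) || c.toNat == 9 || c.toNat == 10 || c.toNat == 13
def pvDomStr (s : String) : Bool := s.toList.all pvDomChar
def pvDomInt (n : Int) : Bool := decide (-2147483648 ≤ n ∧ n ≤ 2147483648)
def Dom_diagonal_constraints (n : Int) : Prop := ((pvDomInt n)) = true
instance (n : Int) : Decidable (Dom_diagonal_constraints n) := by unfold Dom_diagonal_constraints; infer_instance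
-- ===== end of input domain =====

-- B replaces A's per-diagonal full-board rediscovery scan by a closed-form enumeration of each
-- diagonal's cells plus a head-versus-rest pair emission (same output, different algorithm).

-- ===== PORT A =====

-- helper transform_coordinates_xy_to_val; coord_xy[1]/coord_xy[0] are always in range on A's calls
def pvTransform (coord_xy : List Int) (n : Int) : Int :=
  (PySem.List.pyGetD coord_xy 1 0 - 1) * n + PySem.List.pyGetD coord_xy 0 0

-- internal compute_diagonal; 'for j in range(0, len(possible_x))' indexes possible_x[j], i.e. iterates the list
def pvComputeDiagonal (i n : Int) (type : String) : List (List Int) :=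
  let possible_x : List Int := (PySem.List.pyRange 0 n).foldl (fun acc j => acc ++ [j]) []
  let possible_y : List Int := (PySem.List.pyRange 0 n).foldl (fun acc j => acc ++ [j]) []
  if type == "anti" then
    possible_x.foldl (fun di xj =>
      possible_y.foldl (fun di yk => if (xj + yk) == i then di ++ [[xj + 1, yk + 1]] else di) di) []
  else if type == "main" then
    possible_x.foldl (fun di xj =>
      possible_y.foldl (fun di yk => if (xj - yk) == i then di ++ [[xj + 1, yk + 1]] else di) di) []
  else []

def diagonal_constraints (n : Int) : List (List Int) :=
  let clauses1 : List (List Int) :=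
    (PySem.List.pyRange 1 (2 * n - 2)).foldl (fun clauses i =>
      let d := pvComputeDiagonal i n "anti"
      (PySem.List.pyRange 1 ((PySem.List.len d) + 1)).foldl (fun cl j =>
        (PySem.List.pyRange (j + 1) ((PySem.List.len d) + 1)).foldl (fun cl k =>
          cl ++ [[-(pvTransform (PySem.List.pyGetD d (j - 1) []) n),
                  -(pvTransform (PySem.List.pyGetD d (k - 1) []) n)]]) cl) clauses) []
  (PySem.List.pyRange (-n + 2) (n - 1)).foldl (fun clauses i =>
    let d := pvComputeDiagonal i n "main"
    (PySem.List.pyRange 1 ((PySem.List.len d) + 1)).foldl (fun cl j =>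
      (PySem.List.pyRange (j + 1) ((PySem.List.len d) + 1)).foldl (fun cl k =>
        cl ++ [[-(pvTransform (PySem.List.pyGetD d (j - 1) []) n),
                -(pvTransform (PySem.List.pyGetD d (k - 1) []) n)]]) cl) clauses) clauses1

-- ===== PORT B =====

-- pairs(cells): the while loop drops the head each round = structural recursion on the list
def pvPairs : List Int → List (List Int)
  | [] => []
  | c :: rest => rest.map (fun d => [-c, -d]) ++ pvPairs rest

def diagonal_constraints_alt (n : Int) : List (List Int) :=
  let clauses1 : List (List Int) :=
    (PySem.List.pyRange 1 (2 * n - 2)).foldl (fun clauses i =>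
      clauses ++ pvPairs ((PySem.List.pyRange (max 0 (i - n + 1)) (min i (n - 1) + 1)).map
        (fun x => (i - x) * n + x + 1))) []
  (PySem.List.pyRange (-n + 2) (n - 1)).foldl (fun clauses i =>
    clauses ++ pvPairs ((PySem.List.pyRange (max 0 i) (min (n - 1) (n - 1 + i) + 1)).map
      (fun x => (x - i) * n + x + 1))) clauses1

-- ===== PRECONDITION & SPEC =====
def Spec_diagonal_constraints (n : Int) (out : List (List Int)) : Prop := out = diagonal_constraints_alt n
instance (n : Int) (out : List (List Int)) : Decidable (Spec_diagonal_constraints n out) := by unfold Spec_diagonal_constraints; infer_instance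

-- ===== CLAIM (what is proved, stated in full; the proofs are below) =====
def Claim_equal_diagonal_constraints : Prop := ∀ (n : Int), Dom_diagonal_constraints n → Spec_diagonal_constraints n (diagonal_constraints n)

-- ===== LEMMAS AND PROOFS =====

theorem pv_pyRange_nil {a b : Int} (h : b ≤ a) : PySem.List.pyRange a b = [] := by
  simp [PySem.List.pyRange, if_neg (not_lt.mpr h)]

theorem pv_pyRange_shift (a b : Int) :
    PySem.List.pyRange (a + 1) (b + 1) = (PySem.List.pyRange a b).map (· + 1) := by
  simp only [PySem.List.pyRange, List.map_map, if_neg (one_ne_zero), if_pos (zero_lt_one)]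
  have hc : b + 1 - (a + 1) = b - a := by ring
  by_cases h : a < b
  · rw [if_pos (by omega), if_pos h, hc]
    apply List.map_congr_left; intro k _; simp; ring
  · rw [if_neg (by omega), if_neg h]; rfl

theorem pv_pyGetD_cons_pos {α : Type} (x : α) (xs : List α) (j : Int) (d : α) (h : 0 < j) :
    PySem.List.pyGetD (x :: xs) j d = PySem.List.pyGetD xs (j - 1) d := by
  rw [PySem.List.pyGetD_of_nonneg _ _ (by omega), PySem.List.pyGetD_of_nonneg _ _ (by omega)]
  have : j.toNat = (j - 1).toNat + 1 := by omega
  rw [this]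
  rfl

theorem pv_pyGetD_cons_zero {α : Type} (x : α) (xs : List α) (d : α) :
    PySem.List.pyGetD (x :: xs) 0 d = x := by
  rw [PySem.List.pyGetD_of_nonneg _ _ le_rfl]
  rfl

theorem pv_transform_pair (x y n : Int) : pvTransform [x + 1, y + 1] n = y * n + x + 1 := by
  unfold pvTransform
  rw [pv_pyGetD_cons_pos _ _ 1 _ one_pos]
  norm_num
  ring

-- filtering a unit range by equality to a single value
theorem pv_filter_range_eq (a b t : Int) :
    (PySem.List.pyRange a b).filter (fun y => y == t) =
      if a ≤ t ∧ t < b then [t] else [] := by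
  have key : ∀ (m : Nat) (a : Int), (b - a).toNat ≤ m →
      (PySem.List.pyRange a b).filter (fun y => y == t) =
        if a ≤ t ∧ t < b then [t] else [] := by
    intro m
    induction m with
    | zero =>
      intro a hm
      rw [pv_pyRange_nil (by omega), if_neg (by omega)]
      rfl
    | succ m ih =>
      intro a hm
      by_cases hab : a < b
      · rw [PySem.List.pyRange_one_cons hab, List.filter_cons, ih (a + 1) (by omega)]
        by_cases hat : a = t
        · subst hat
          rw [if_pos (by simp), if_neg (by omega), if_pos (by omega)]
        · rw [if_neg (by simp [hat])]
          have : (a + 1 ≤ t ∧ t < b) ↔ (a ≤ t ∧ t < b) := by omega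
          rw [if_congr this rfl rfl]
      · rw [pv_pyRange_nil (by omega), if_neg (by omega)]
        rfl
  exact key (b - a).toNat a le_rfl

-- a window condition over a unit range collapses to the clamped subrange
theorem pv_flatMap_window (a b lo hi : Int) (f : Int → List Int) :
    (PySem.List.pyRange a b).flatMap
        (fun x => if lo ≤ x ∧ x ≤ hi then [f x] else []) =
      (PySem.List.pyRange (max a lo) (min (b - 1) hi + 1)).map f := by
  have key : ∀ (m : Nat) (a : Int), (b - a).toNat ≤ m →
      (PySem.List.pyRange a b).flatMap
          (fun x => if lo ≤ x ∧ x ≤ hi then [f x] else []) =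
        (PySem.List.pyRange (max a lo) (min (b - 1) hi + 1)).map f := by
    intro m
    induction m with
    | zero =>
      intro a hm
      rw [pv_pyRange_nil (by omega), pv_pyRange_nil (by omega)]
      rfl
    | succ m ih =>
      intro a hm
      by_cases hab : a < b
      · rw [PySem.List.pyRange_one_cons hab, List.flatMap_cons, ih (a + 1) (by omega)]
        by_cases hin : lo ≤ a ∧ a ≤ hi
        · rw [if_pos hin]
          have h1 : max a lo = a := by omega
          have h2 : max (a + 1) lo = a + 1 := by omega
          have h3 : a < min (b - 1) hi + 1 := by omega
          rw [h1, h2, PySem.List.pyRange_one_cons h3, List.map_cons]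
          rfl
        · rw [if_neg hin, List.nil_append]
          by_cases hlo : a < lo
          · have : max a lo = max (a + 1) lo := by omega
            rw [this]
          · have h4 : hi < a := by omega
            rw [pv_pyRange_nil (by omega), pv_pyRange_nil (by omega)]
      · rw [pv_pyRange_nil (by omega), pv_pyRange_nil (by omega)]
        rfl
  exact key (b - a).toNat a le_rfl

-- A's index double loop, written as a flatMap, is pvPairs of the list
theorem pv_idxPairs (dflt : Int) (l : List Int) :
    (PySem.List.pyRange 1 (PySem.List.len l + 1)).flatMap (fun j =>
      (PySem.List.pyRange (j + 1) (PySem.List.len l + 1)).map (fun k =>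
        [-(PySem.List.pyGetD l (j - 1) dflt), -(PySem.List.pyGetD l (k - 1) dflt)]))
    = pvPairs l := by
  induction l with
  | nil =>
    rw [pv_pyRange_nil (by simp [PySem.List.len])]
    rfl
  | cons c rest ih =>
    have hL : PySem.List.len (c :: rest) = PySem.List.len rest + 1 := by
      simp [PySem.List.len]
    have hR0 : 0 ≤ PySem.List.len rest := by simp [PySem.List.len]
    rw [hL, PySem.List.pyRange_one_cons (by omega), List.flatMap_cons]
    have hsh : PySem.List.pyRange (1 + 1) (PySem.List.len rest + 1 + 1)
        = (PySem.List.pyRange 1 (PySem.List.len rest + 1)).map (· + 1) :=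
      pv_pyRange_shift 1 (PySem.List.len rest + 1)
    have hsh0 : PySem.List.pyRange 1 (PySem.List.len rest + 1)
        = (PySem.List.pyRange 0 (PySem.List.len rest)).map (· + 1) := by
      have h := pv_pyRange_shift 0 (PySem.List.len rest)
      norm_num at h
      exact h
    have hhead : (PySem.List.pyRange (1 + 1) (PySem.List.len rest + 1 + 1)).map (fun k =>
          [-(PySem.List.pyGetD (c :: rest) (1 - 1) dflt), -(PySem.List.pyGetD (c :: rest) (k - 1) dflt)])
        = rest.map (fun d => [-c, -d]) := by
      rw [hsh, List.map_map]
      have h1 : ∀ k ∈ PySem.List.pyRange 1 (PySem.List.len rest + 1),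
          ((fun k => [-(PySem.List.pyGetD (c :: rest) (1 - 1) dflt),
                      -(PySem.List.pyGetD (c :: rest) (k - 1) dflt)]) ∘ (· + 1)) k
          = [-c, -(PySem.List.pyGetD rest (k - 1) dflt)] := by
        intro k hk
        rw [PySem.List.mem_pyRange_one] at hk
        simp only [Function.comp, add_sub_cancel_right]
        rw [show (1 : Int) - 1 = 0 by ring, pv_pyGetD_cons_zero,
            pv_pyGetD_cons_pos c rest k dflt (by omega)]
      rw [List.map_congr_left h1, hsh0, List.map_map]
      have h2 : ∀ k ∈ PySem.List.pyRange 0 (PySem.List.len rest),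
          ((fun k => [-c, -(PySem.List.pyGetD rest (k - 1) dflt)]) ∘ (· + 1)) k
          = (fun d => [-c, -d]) (PySem.List.pyGetD rest k dflt) := by
        intro k hk
        simp only [Function.comp, add_sub_cancel_right]
      rw [List.map_congr_left h2]
      conv_rhs => rw [← PySem.List.map_pyGetD_pyRange_zero rest dflt]
      rw [List.map_map]
      rfl
    have htail : (PySem.List.pyRange (1 + 1) (PySem.List.len rest + 1 + 1)).flatMap (fun j =>
          (PySem.List.pyRange (j + 1) (PySem.List.len rest + 1 + 1)).map (fun k =>
            [-(PySem.List.pyGetD (c :: rest) (j - 1) dflt), -(PySem.List.pyGetD (c :: rest) (k - 1) dflt)]))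
        = pvPairs rest := by
      rw [hsh, List.flatMap_map, ← ih]
      apply List.flatMap_congr
      intro j hj
      rw [PySem.List.mem_pyRange_one] at hj
      have hshj : PySem.List.pyRange (j + 1 + 1) (PySem.List.len rest + 1 + 1)
          = (PySem.List.pyRange (j + 1) (PySem.List.len rest + 1)).map (· + 1) :=
        pv_pyRange_shift (j + 1) (PySem.List.len rest + 1)
      rw [hshj, List.map_map]
      apply List.map_congr_left
      intro k hk
      rw [PySem.List.mem_pyRange_one] at hk
      simp only [Function.comp, add_sub_cancel_right]
      rw [pv_pyGetD_cons_pos c rest j dflt (by omega),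
          pv_pyGetD_cons_pos c rest k dflt (by omega)]
    rw [hhead, htail]
    rfl

-- A's clause double loop over a diagonal d is pvPairs of d's values
theorem pv_pairLoop (n : Int) (d : List (List Int)) (cl : List (List Int)) :
    (PySem.List.pyRange 1 ((PySem.List.len d) + 1)).foldl (fun cl j =>
        (PySem.List.pyRange (j + 1) ((PySem.List.len d) + 1)).foldl (fun cl k =>
          cl ++ [[-(pvTransform (PySem.List.pyGetD d (j - 1) []) n),
                  -(pvTransform (PySem.List.pyGetD d (k - 1) []) n)]]) cl) cl
      = cl ++ pvPairs (d.map (fun c => pvTransform c n)) := by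
  simp only [PySem.List.foldl_append_singleton_eq_map, PySem.List.foldl_append_eq_flatMap]
  rw [← pv_idxPairs (pvTransform [] n) (d.map (fun c => pvTransform c n))]
  have hlen : PySem.List.len (d.map (fun c => pvTransform c n)) = PySem.List.len d := by
    simp [PySem.List.len]
  rw [hlen]
  congr 1
  apply List.flatMap_congr
  intro j _
  apply List.map_congr_left
  intro k _
  rw [PySem.List.pyGetD_map (fun c => pvTransform c n) d (j - 1) [],
      PySem.List.pyGetD_map (fun c => pvTransform c n) d (k - 1) []]

-- A's anti-diagonal cell list in closed form
theorem pv_cd_anti (i n : Int) :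
    pvComputeDiagonal i n "anti" =
      (PySem.List.pyRange (max 0 (i - n + 1)) (min i (n - 1) + 1)).map
        (fun x => [x + 1, i - x + 1]) := by
  unfold pvComputeDiagonal
  simp only [PySem.List.foldl_append_singleton, List.nil_append, BEq.rfl, if_true,
    PySem.List.foldl_append_if, PySem.List.foldl_append_eq_flatMap]
  have h1 : ∀ xj : Int, (fun yk : Int => (xj + yk) == i) = (fun yk : Int => yk == (i - xj)) := by
    intro xj; funext yk
    by_cases h : xj + yk = i
    · simp [show yk = i - xj by omega]
    · simp [h, show ¬(yk = i - xj) by omega]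
  have h2 : (fun xj => List.map (fun yk => [xj + 1, yk + 1])
        (List.filter (fun yk => (xj + yk) == i) (PySem.List.pyRange 0 n)))
      = fun xj : Int => if i - n + 1 ≤ xj ∧ xj ≤ i then [(fun x : Int => [x + 1, i - x + 1]) xj] else [] := by
    funext xj
    rw [h1 xj, pv_filter_range_eq 0 n (i - xj)]
    by_cases hc : 0 ≤ i - xj ∧ i - xj < n
    · rw [if_pos hc, if_pos (by omega)]
      rfl
    · rw [if_neg hc, if_neg (by omega)]
      rfl
  rw [h2, pv_flatMap_window 0 n (i - n + 1) i, min_comm]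

-- A's main-diagonal cell list in closed form
theorem pv_cd_main (i n : Int) :
    pvComputeDiagonal i n "main" =
      (PySem.List.pyRange (max 0 i) (min (n - 1) (n - 1 + i) + 1)).map
        (fun x => [x + 1, x - i + 1]) := by
  unfold pvComputeDiagonal
  simp only [PySem.List.foldl_append_singleton, List.nil_append, BEq.rfl, if_true,
    show (("main" == "anti") = true) = False by simp, if_false,
    PySem.List.foldl_append_if, PySem.List.foldl_append_eq_flatMap]
  have h1 : ∀ xj : Int, (fun yk : Int => (xj - yk) == i) = (fun yk : Int => yk == (xj - i)) := by
    intro xj; funext yk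
    by_cases h : xj - yk = i
    · simp [show yk = xj - i by omega]
    · simp [h, show ¬(yk = xj - i) by omega]
  have h2 : (fun xj => List.map (fun yk => [xj + 1, yk + 1])
        (List.filter (fun yk => (xj - yk) == i) (PySem.List.pyRange 0 n)))
      = fun xj : Int => if i ≤ xj ∧ xj ≤ n - 1 + i then [(fun x : Int => [x + 1, x - i + 1]) xj] else [] := by
    funext xj
    rw [h1 xj, pv_filter_range_eq 0 n (xj - i)]
    by_cases hc : 0 ≤ xj - i ∧ xj - i < n
    · rw [if_pos hc, if_pos (by omega)]
      rfl
    · rw [if_neg hc, if_neg (by omega)]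
      rfl
  rw [h2, pv_flatMap_window 0 n i (n - 1 + i)]

-- the anti-diagonal cells of A, mapped to values, are B's closed-form list
theorem pv_cells_anti (i n : Int) :
    (pvComputeDiagonal i n "anti").map (fun c => pvTransform c n) =
      (PySem.List.pyRange (max 0 (i - n + 1)) (min i (n - 1) + 1)).map
        (fun x => (i - x) * n + x + 1) := by
  rw [pv_cd_anti, List.map_map]
  apply List.map_congr_left
  intro x _
  simp only [Function.comp]
  rw [pv_transform_pair x (i - x) n]

-- the main-diagonal cells of A, mapped to values, are B's closed-form list
theorem pv_cells_main (i n : Int) :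
    (pvComputeDiagonal i n "main").map (fun c => pvTransform c n) =
      (PySem.List.pyRange (max 0 i) (min (n - 1) (n - 1 + i) + 1)).map
        (fun x => (x - i) * n + x + 1) := by
  rw [pv_cd_main, List.map_map]
  apply List.map_congr_left
  intro x _
  simp only [Function.comp]
  rw [pv_transform_pair x (x - i) n]

-- ===== VERDICT (by name: the statement is the Claim_ definition above) =====
theorem diagonal_constraints_spec : Claim_equal_diagonal_constraints := by
  intro n _
  unfold Spec_diagonal_constraints diagonal_constraints diagonal_constraints_alt
  simp only [pv_pairLoop, pv_cells_anti, pv_cells_main]
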